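-- pv_equiv track=rewrite | github.com/Satyamrtiwari/AYUSHAgent | backend/ayush_project/ayush_app/agents/mapping_agent.py | prioritize_icd_results_by_description
-- ===== SOURCE A (Python) =====
-- def prioritize_icd_results_by_description(results, translated_term, detailed_term=None):
--     """
--     Prioritize ICD results based on description matching.
--     Priority order:
--     1. Results where description contains the detailed translated term
--     2. Results where description contains the simple translated term
--     3. Generic/unspecified codes
--     4. Other results
--     """
--     if not results:
--         return results
--
--     description_matches = []
--     simple_matches = []
--     generic_codes = []
--     others = []
--
--     # Keywords for generic/unspecified codes
--     generic_keywords = ['unspecified', 'nos', 'not elsewhere classified', 'other or unknown']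
--
--     for r in results:
--         title = (r.get("title") or "").lower()
--         description = (r.get("description") or "").lower()
--         code = r.get("code") or r.get("theCode", "")
--
--         # Check if description matches detailed term
--         if detailed_term and description:
--             if detailed_term.lower() in description:
--                 description_matches.append(r)
--                 continue
--
--         # Check if description matches simple term
--         if translated_term and description:
--             if translated_term.lower() in description:
--                 simple_matches.append(r)
--                 continue
--
--         # Check if it's generic/unspecified
--         is_generic = any(keyword in title for keyword in generic_keywords)
--         is_base_code = code and '.' not in code.split('/')[0]
--
--         if is_generic or is_base_code:
--             generic_codes.append(r)
--         else:
--             others.append(r)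
--
--     # Combine in priority order
--     prioritized = description_matches + simple_matches + generic_codes + others
--
--     return prioritized
-- ===== SOURCE B (Python) =====
-- def prioritize_icd_results_by_description(results, translated_term, detailed_term=None):
--     """Stable sort under a rank computed as the index of the first matching test."""
--     if not results:
--         return results
--
--     generic_keywords = ['unspecified', 'nos', 'not elsewhere classified', 'other or unknown']
--
--     def rank(r):
--         title = (r.get("title") or "").lower()
--         description = (r.get("description") or "").lower()
--         code = r.get("code") or r.get("theCode", "")
--         tests = [
--             bool(detailed_term) and detailed_term.lower() in description,
--             bool(translated_term) and translated_term.lower() in description,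
--             any(k in title for k in generic_keywords)
--                 or bool(code) and '.' not in code.split('/')[0],
--         ]
--         return tests.index(True) if True in tests else len(tests)
--
--     return sorted(results, key=rank)
-- ===== Notes on version B (the rewrite author's own statement) =====
-- stated objective: simpler
-- what changed: Replaces A's four explicit bucket lists and their concatenation by one stable sort under an integer rank computed as the index of the first satisfied test in a list of three membership tests; sort stability preserves original order within each rank.
import Mathlib
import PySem

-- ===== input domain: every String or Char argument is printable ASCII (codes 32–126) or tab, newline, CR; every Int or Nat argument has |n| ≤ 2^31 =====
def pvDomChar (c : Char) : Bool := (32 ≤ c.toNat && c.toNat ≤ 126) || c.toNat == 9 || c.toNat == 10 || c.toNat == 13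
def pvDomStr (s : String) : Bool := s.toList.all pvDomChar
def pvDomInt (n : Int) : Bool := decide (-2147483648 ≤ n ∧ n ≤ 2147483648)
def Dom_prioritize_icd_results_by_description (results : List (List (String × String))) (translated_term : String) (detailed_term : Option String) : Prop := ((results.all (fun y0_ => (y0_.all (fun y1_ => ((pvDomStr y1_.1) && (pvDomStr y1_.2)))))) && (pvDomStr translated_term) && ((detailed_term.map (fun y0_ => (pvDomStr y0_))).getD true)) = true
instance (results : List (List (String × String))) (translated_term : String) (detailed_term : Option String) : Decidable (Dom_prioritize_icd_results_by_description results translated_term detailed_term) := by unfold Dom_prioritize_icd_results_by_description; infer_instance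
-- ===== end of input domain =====

-- B replaces A's four explicit bucket lists and their concatenation by one stable sort
-- under an integer rank = index of the first satisfied test (objective: simpler).

-- ===== PORT A =====
-- Python dict.get(k) on an association list (first match)
def pvGet (r : List (String × String)) (k : String) : Option String :=
  match r with
  | [] => none
  | (k', v) :: t => if k' == k then some v else pvGet t k

def pvGenericKeywords : List String :=
  ["unspecified", "nos", "not elsewhere classified", "other or unknown"]

-- the body of A's for-loop: route r into one of the four buckets
def pvStepA (translated_term : String) (detailed_term : Option String)
    (acc : List (List (String × String)) × List (List (String × String)) × List (List (String × String)) × List (List (String × String)))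
    (r : List (String × String)) :
    List (List (String × String)) × List (List (String × String)) × List (List (String × String)) × List (List (String × String)) :=
  let (dm, sm, gc, ot) := acc
  let title := PySem.Str.lower ((pvGet r "title").getD "")
  let description := PySem.Str.lower ((pvGet r "description").getD "")
  let c0 := (pvGet r "code").getD ""
  let code := if c0 = "" then (pvGet r "theCode").getD "" else c0
  if (match detailed_term with
      | none => false
      | some d => decide (d ≠ "") && decide (description ≠ "") && PySem.Str.isIn (PySem.Str.lower d) description) then
    (dm ++ [r], sm, gc, ot)
  else if decide (translated_term ≠ "") && decide (description ≠ "") && PySem.Str.isIn (PySem.Str.lower translated_term) description then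
    (dm, sm ++ [r], gc, ot)
  else
    -- code.split('/')[0]: split with a nonempty separator is never empty, so headD "" is exact
    let is_generic := pvGenericKeywords.any (fun k => PySem.Str.isIn k title)
    let is_base_code := decide (code ≠ "") && !(PySem.Str.isIn "." (((PySem.Str.split? code "/").getD []).headD ""))
    if is_generic || is_base_code then (dm, sm, gc ++ [r], ot)
    else (dm, sm, gc, ot ++ [r])

def prioritize_icd_results_by_description (results : List (List (String × String))) (translated_term : String) (detailed_term : Option String) : List (List (String × String)) :=
  match results with
  | [] => results
  | _ :: _ =>
    let acc := results.foldl (pvStepA translated_term detailed_term) ([], [], [], [])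
    acc.1 ++ acc.2.1 ++ acc.2.2.1 ++ acc.2.2.2

-- ===== PORT B =====
-- Source B's rank(r): index of the first satisfied test in a three-element test list
def pvRank (translated_term : String) (detailed_term : Option String)
    (r : List (String × String)) : Int :=
  let get := fun (k : String) => (((r.find? (fun p => p.1 == k)).map (fun p => p.2)).getD "")
  let title := PySem.Str.lower (get "title")
  let description := PySem.Str.lower (get "description")
  let code := if get "code" = "" then get "theCode" else get "code"
  let dt := detailed_term.getD ""
  let tests : List Bool :=
    [ decide (dt ≠ "") && PySem.Str.isIn (PySem.Str.lower dt) description,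
      decide (translated_term ≠ "") && PySem.Str.isIn (PySem.Str.lower translated_term) description,
      pvGenericKeywords.any (fun k => PySem.Str.isIn k title) ||
        (decide (code ≠ "") && !(PySem.Str.isIn "." (((PySem.Str.split? code "/").getD []).headD ""))) ]
  match PySem.List.index? tests true with
  | some i => (i : Int)
  | none => (tests.length : Int)

def prioritize_icd_results_by_description_alt (results : List (List (String × String))) (translated_term : String) (detailed_term : Option String) : List (List (String × String)) :=
  if results.isEmpty then results
  else PySem.List.sorted results (pvRank translated_term detailed_term)

-- ===== PRECONDITION & SPEC =====
def Spec_prioritize_icd_results_by_description (results : List (List (String × String))) (translated_term : String) (detailed_term : Option String) (out : List (List (String × String))) : Prop := out = prioritize_icd_results_by_description_alt results translated_term detailed_term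
instance (results : List (List (String × String))) (translated_term : String) (detailed_term : Option String) (out : List (List (String × String))) : Decidable (Spec_prioritize_icd_results_by_description results translated_term detailed_term out) := by unfold Spec_prioritize_icd_results_by_description; infer_instance

-- ===== CLAIM (what is proved, stated in full; the proofs are below) =====
def Claim_equal_prioritize_icd_results_by_description : Prop := ∀ (results : List (List (String × String))) (translated_term : String) (detailed_term : Option String), Dom_prioritize_icd_results_by_description results translated_term detailed_term → Spec_prioritize_icd_results_by_description results translated_term detailed_term (prioritize_icd_results_by_description results translated_term detailed_term)

-- ===== LEMMAS AND PROOFS =====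

-- dict.get, two phrasings: A's hand recursion = B's find?
theorem pvGet_eq_find? (r : List (String × String)) (k : String) :
    pvGet r k = (r.find? (fun p => p.1 == k)).map (fun p => p.2) := by
  induction r with
  | nil => rfl
  | cons a t ih =>
    obtain ⟨k', v⟩ := a
    by_cases h : k' == k <;> simp [pvGet, List.find?, h, ih]

theorem pv_lower_ne_empty (s : String) (h : s ≠ "") : PySem.Str.lower s ≠ "" := by
  intro he
  have := congrArg String.toList he
  rw [PySem.Str.toList_lower] at this
  simp [PySem.Chars.lower] at this
  exact h this

theorem pv_isIn_empty_eq_false (s : String) (h : s ≠ "") : PySem.Str.isIn s "" = false := by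
  rw [PySem.Str.isIn_eq, PySem.Chars.isIn_eq_false_iff]
  intro hinf
  simp at hinf
  exact h (by cases s; simp_all)

-- dropping A's 'description nonempty' guard does not change the test
theorem pv_cond_eq (d desc : String) :
    (decide (d ≠ "") && decide (desc ≠ "") && PySem.Str.isIn (PySem.Str.lower d) desc)
      = (decide (d ≠ "") && PySem.Str.isIn (PySem.Str.lower d) desc) := by
  by_cases hd : d = ""
  · simp [hd]
  · by_cases hdesc : desc = ""
    · subst hdesc
      rw [pv_isIn_empty_eq_false _ (pv_lower_ne_empty d hd)]
      simp
    · simp [hd, hdesc]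

-- evaluating 'index of the first true' over a literal three-element list
theorem pv_rankIdx (b0 b1 b2 : Bool) :
    (match PySem.List.index? [b0, b1, b2] true with
     | some i => (i : Int)
     | none => (([b0, b1, b2] : List Bool).length : Int)) =
    if b0 then 0 else if b1 then 1 else if b2 then 2 else 3 := by
  cases b0 <;> cases b1 <;> cases b2 <;> rfl

-- B's rank, re-expressed as A's if-chain over A's condition terms
theorem pvRank_eq (tt : String) (dt : Option String) (r : List (String × String)) :
    pvRank tt dt r =
      (let title := PySem.Str.lower ((pvGet r "title").getD "")
       let description := PySem.Str.lower ((pvGet r "description").getD "")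
       let c0 := (pvGet r "code").getD ""
       let code := if c0 = "" then (pvGet r "theCode").getD "" else c0
       if (match dt with
           | none => false
           | some d => decide (d ≠ "") && decide (description ≠ "") && PySem.Str.isIn (PySem.Str.lower d) description) then (0 : Int)
       else if decide (tt ≠ "") && decide (description ≠ "") && PySem.Str.isIn (PySem.Str.lower tt) description then 1
       else if pvGenericKeywords.any (fun k => PySem.Str.isIn k title) ||
           (decide (code ≠ "") && !(PySem.Str.isIn "." (((PySem.Str.split? code "/").getD []).headD ""))) then 2
       else 3) := by
  simp only [pvRank, ← pvGet_eq_find?]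
  rw [pv_rankIdx]
  cases dt with
  | none =>
    dsimp only
    rw [Option.getD_none, pv_cond_eq tt (PySem.Str.lower ((pvGet r "description").getD ""))]
    simp
  | some d =>
    dsimp only
    rw [Option.getD_some]
    simp only [pv_cond_eq]

-- A's loop body routes r into bucket number (pvRank tt dt r)
theorem pvStepA_eq (tt : String) (dt : Option String)
    (dm sm gc ot : List (List (String × String))) (r : List (String × String)) :
    pvStepA tt dt (dm, sm, gc, ot) r =
      if pvRank tt dt r = 0 then (dm ++ [r], sm, gc, ot)
      else if pvRank tt dt r = 1 then (dm, sm ++ [r], gc, ot)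
      else if pvRank tt dt r = 2 then (dm, sm, gc ++ [r], ot)
      else (dm, sm, gc, ot ++ [r]) := by
  simp only [pvStepA, pvRank_eq]
  split_ifs <;> first | rfl | omega

-- the rank only takes the values 0,1,2,3
theorem pvRank_cases (tt : String) (dt : Option String) (r : List (String × String)) :
    pvRank tt dt r = 0 ∨ pvRank tt dt r = 1 ∨ pvRank tt dt r = 2 ∨ pvRank tt dt r = 3 := by
  simp only [pvRank_eq]
  split_ifs <;> simp

-- running A's loop appends the four filtered buckets to the accumulators
theorem pvFoldA_eq (tt : String) (dt : Option String) (xs : List (List (String × String))) :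
    ∀ dm sm gc ot,
    xs.foldl (pvStepA tt dt) (dm, sm, gc, ot) =
      (dm ++ xs.filter (fun r => pvRank tt dt r == 0),
       sm ++ xs.filter (fun r => pvRank tt dt r == 1),
       gc ++ xs.filter (fun r => pvRank tt dt r == 2),
       ot ++ xs.filter (fun r => pvRank tt dt r == 3)) := by
  induction xs with
  | nil => intro dm sm gc ot; simp
  | cons x xs ih =>
    intro dm sm gc ot
    rw [List.foldl_cons, pvStepA_eq]
    rcases pvRank_cases tt dt x with h | h | h | h <;>
      simp [h, ih]

theorem pv_insertBy_skip {α : Type} (before : α → α → Bool) (x : α) (l1 l2 : List α)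
    (h : ∀ y ∈ l1, before x y = false) :
    PySem.List.insertBy before x (l1 ++ l2) = l1 ++ PySem.List.insertBy before x l2 := by
  induction l1 with
  | nil => simp
  | cons a t ih =>
    have ha : before x a = false := h a (by simp)
    simp [PySem.List.insertBy, ha, ih (fun y hy => h y (List.mem_cons_of_mem _ hy))]

theorem pv_insertBy_front {α : Type} (before : α → α → Bool) (x : α) (L : List α)
    (h : ∀ y ∈ L, before x y = true) :
    PySem.List.insertBy before x L = x :: L := by
  cases L with
  | nil => rfl
  | cons a t => simp [PySem.List.insertBy, h a (by simp)]

theorem pv_key_of_mem_filter {α : Type} (k : α → Int) (j : Int) (xs : List α) (y : α)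
    (hy : y ∈ xs.filter (fun r => k r == j)) : k y = j := by
  simpa using List.of_mem_filter hy

-- a stable sort under a key with values in {0,1,2,3} is the concatenation of the four buckets
theorem pv_sorted_buckets {α : Type} (k : α → Int) (xs : List α)
    (hk : ∀ x ∈ xs, k x = 0 ∨ k x = 1 ∨ k x = 2 ∨ k x = 3) :
    PySem.List.sorted xs k =
      xs.filter (fun r => k r == 0) ++ xs.filter (fun r => k r == 1) ++
      xs.filter (fun r => k r == 2) ++ xs.filter (fun r => k r == 3) := by
  rw [PySem.List.sorted_eq_foldl_insertBy]
  induction xs using List.reverseRecOn with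
  | nil => simp
  | append_singleton xs x ih =>
    have hk' : ∀ y ∈ xs, k y = 0 ∨ k y = 1 ∨ k y = 2 ∨ k y = 3 :=
      fun y hy => hk y (by simp [hy])
    rw [List.foldl_append, List.foldl_cons, List.foldl_nil, ih hk']
    rcases hk x (by simp) with hx | hx | hx | hx
    · rw [List.append_assoc, List.append_assoc,
        pv_insertBy_skip _ _ _ _ (fun y hy => by
          have h0 := pv_key_of_mem_filter k 0 xs y hy; simp [hx, h0]),
        pv_insertBy_front _ _ _ (fun y hy => by
          simp only [List.mem_append] at hy
          rcases hy with hy | hy | hy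
          · have h1 := pv_key_of_mem_filter k 1 xs y hy; simp [hx, h1]
          · have h2 := pv_key_of_mem_filter k 2 xs y hy; simp [hx, h2]
          · have h3 := pv_key_of_mem_filter k 3 xs y hy; simp [hx, h3])]
      simp [List.filter_append, hx]
    · rw [List.append_assoc (List.filter (fun r => k r == 0) xs ++ List.filter (fun r => k r == 1) xs),
        pv_insertBy_skip _ _ _ _ (fun y hy => by
          simp only [List.mem_append] at hy
          rcases hy with hy | hy
          · have h0 := pv_key_of_mem_filter k 0 xs y hy; simp [hx, h0]
          · have h1 := pv_key_of_mem_filter k 1 xs y hy; simp [hx, h1]),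
        pv_insertBy_front _ _ _ (fun y hy => by
          simp only [List.mem_append] at hy
          rcases hy with hy | hy
          · have h2 := pv_key_of_mem_filter k 2 xs y hy; simp [hx, h2]
          · have h3 := pv_key_of_mem_filter k 3 xs y hy; simp [hx, h3])]
      simp [List.filter_append, hx]
    · rw [pv_insertBy_skip _ _ _ _ (fun y hy => by
          simp only [List.mem_append] at hy
          rcases hy with (hy | hy) | hy
          · have h0 := pv_key_of_mem_filter k 0 xs y hy; simp [hx, h0]
          · have h1 := pv_key_of_mem_filter k 1 xs y hy; simp [hx, h1]
          · have h2 := pv_key_of_mem_filter k 2 xs y hy; simp [hx, h2]),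
        pv_insertBy_front _ _ _ (fun y hy => by
          have h3 := pv_key_of_mem_filter k 3 xs y hy; simp [hx, h3])]
      simp [List.filter_append, hx]
    · rw [PySem.List.insertBy_of_forall_not_before _ _ _ (fun y hy => by
        simp only [List.mem_append] at hy
        rcases hy with ((hy | hy) | hy) | hy
        · have h0 := pv_key_of_mem_filter k 0 xs y hy; simp [hx, h0]
        · have h1 := pv_key_of_mem_filter k 1 xs y hy; simp [hx, h1]
        · have h2 := pv_key_of_mem_filter k 2 xs y hy; simp [hx, h2]
        · have h3 := pv_key_of_mem_filter k 3 xs y hy; simp [hx, h3])]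
      simp [List.filter_append, hx]

-- ===== VERDICT (by name: the statement is the Claim_ definition above) =====
theorem prioritize_icd_results_by_description_spec : Claim_equal_prioritize_icd_results_by_description := by
  intro results tt dt _dom
  unfold Spec_prioritize_icd_results_by_description
  unfold prioritize_icd_results_by_description prioritize_icd_results_by_description_alt
  cases results with
  | nil => rfl
  | cons a t =>
    simp only [List.isEmpty_cons, if_neg (by simp : ¬((false : Bool) = true))]
    rw [pvFoldA_eq, pv_sorted_buckets (pvRank tt dt) (a :: t) (fun x _ => pvRank_cases tt dt x)]
    simp [List.append_assoc]
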